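-- pv_equiv track=rewrite | github.com/Chowdhy/data-economy | backend/app/anonymisation.py | passes_l_diversity
-- ===== SOURCE A (Python) =====
-- def normalise_answer(answer):
--     if answer is None:
--         return "Unknown"
--
--     answer = str(answer).strip()
--
--     if not answer:
--         return "Unknown"
--
--     return answer
--
-- def passes_l_diversity(group_sensitive_records, active_sensitive_fields, l):
--     # If the study does not request any configured sensitive fields, there is no l-diversity check to apply
--     if not active_sensitive_fields:
--         return True
--
--     for field_name in active_sensitive_fields:
--         known_values = {
--             normalise_answer(record.get(field_name))
--             for record in group_sensitive_records
--             if normalise_answer(record.get(field_name)) != "Unknown"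
--         }
--
--         # If this sensitive field is being released by the study, but this group has no known values for it, the group should not be released.
--         #UNSURE ABOUT THIS BUT LETS SEE
--         if not known_values:
--             return False
--
--         if len(known_values) < l:
--             return False
--
--     return True
-- ===== SOURCE B (Python) =====
-- def normalise_answer(answer):
--     if answer is None:
--         return "Unknown"
--     answer = str(answer).strip()
--     if not answer:
--         return "Unknown"
--     return answer
--
-- def _distinct_sorted(vals):
--     # vals is sorted: count runs of equal values
--     count = 0
--     prev = None
--     for v in vals:
--         if prev is None or v != prev:
--             count += 1
--         prev = v
--     return count
--
-- def passes_l_diversity(group_sensitive_records, active_sensitive_fields, l):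
--     if not active_sensitive_fields:
--         return True
--     threshold = max(l, 1)
--     return all(
--         _distinct_sorted(sorted(
--             v
--             for v in (normalise_answer(r.get(field)) for r in group_sensitive_records)
--             if v != "Unknown")) >= threshold
--         for field in active_sensitive_fields)
-- ===== Notes on version B (the rewrite author's own statement) =====
-- stated objective: alternative
-- what changed: B counts each field's distinct known values by sorting the normalised values and counting runs of equal adjacent elements (sort-then-scan), instead of A's hash-set comprehension, and folds the per-field checks into a single all() against max(l, 1) with no early returns.
import Mathlib
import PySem

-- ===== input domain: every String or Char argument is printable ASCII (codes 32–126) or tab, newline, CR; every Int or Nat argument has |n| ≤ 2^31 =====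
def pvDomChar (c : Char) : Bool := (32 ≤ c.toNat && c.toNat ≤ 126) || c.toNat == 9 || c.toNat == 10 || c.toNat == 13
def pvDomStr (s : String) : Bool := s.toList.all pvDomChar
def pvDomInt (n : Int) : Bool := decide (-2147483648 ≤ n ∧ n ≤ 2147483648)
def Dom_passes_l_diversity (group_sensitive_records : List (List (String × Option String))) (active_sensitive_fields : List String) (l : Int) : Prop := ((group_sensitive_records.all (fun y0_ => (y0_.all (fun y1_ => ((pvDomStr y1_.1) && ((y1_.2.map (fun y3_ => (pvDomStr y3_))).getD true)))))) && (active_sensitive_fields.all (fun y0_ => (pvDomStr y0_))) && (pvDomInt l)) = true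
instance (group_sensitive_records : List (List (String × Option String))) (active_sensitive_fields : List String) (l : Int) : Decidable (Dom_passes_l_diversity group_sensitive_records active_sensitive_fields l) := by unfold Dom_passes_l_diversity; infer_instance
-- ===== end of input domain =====

-- B replaces A's per-field hash-set comprehension by sort-then-count-runs and a single
-- all() check against max(l, 1); objective: alternative (different algorithm, same result).

-- ===== PORT A =====
-- normalise_answer: None -> "Unknown", else strip; empty -> "Unknown" (shared helper of both Pythons)
def pvNorm (answer : Option String) : String :=
  match answer with
  | none => "Unknown"
  | some s =>
      let t := PySem.Str.strip s
      if t = "" then "Unknown" else t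

-- record.get(field): first-match lookup in the association list, default None (flattened)
def pvGet (record : List (String × Option String)) (field : String) : Option String :=
  ((PySem.Dict.mk record).get? field).join

-- the stream 'normalise_answer(record.get(field)) for record in …, filtered by != "Unknown"'
-- (computed by A's set comprehension and by B's generator alike)
def pvVals (group_sensitive_records : List (List (String × Option String))) (field : String) :
    List String :=
  (group_sensitive_records.map (fun r => pvNorm (pvGet r field))).filter
    (fun v => v != "Unknown")

-- A's for-loop over the fields with its two early returns; the set comprehension is set(stream)
def pvLoopA (group_sensitive_records : List (List (String × Option String))) (l : Int) :
    List String → Bool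
  | [] => true
  | field :: rest =>
      let known := PySem.Set.ofList (pvVals group_sensitive_records field)
      if known.isEmpty then false
      else if PySem.Set.len known < l then false
      else pvLoopA group_sensitive_records l rest

def passes_l_diversity (group_sensitive_records : List (List (String × Option String))) (active_sensitive_fields : List String) (l : Int) : Bool :=
  if active_sensitive_fields.isEmpty then true
  else pvLoopA group_sensitive_records l active_sensitive_fields

-- ===== PORT B =====
-- _distinct_sorted: one for-loop with (count, prev) state counting runs of equal adjacent values
def pvDistinctSorted (vals : List String) : Int :=
  (vals.foldl
    (fun (st : Int × Option String) v =>
      ((if st.2 = some v then st.1 else st.1 + 1), some v))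
    (0, (none : Option String))).1

def passes_l_diversity_alt (group_sensitive_records : List (List (String × Option String))) (active_sensitive_fields : List String) (l : Int) : Bool :=
  if active_sensitive_fields.isEmpty then true
  else
    let threshold := max l 1
    active_sensitive_fields.all (fun field =>
      decide (threshold ≤
        pvDistinctSorted
          (PySem.List.sorted (pvVals group_sensitive_records field) (fun x => x) false)))

-- ===== PRECONDITION & SPEC =====
def Spec_passes_l_diversity (group_sensitive_records : List (List (String × Option String))) (active_sensitive_fields : List String) (l : Int) (out : Bool) : Prop := out = passes_l_diversity_alt group_sensitive_records active_sensitive_fields l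
instance (group_sensitive_records : List (List (String × Option String))) (active_sensitive_fields : List String) (l : Int) (out : Bool) : Decidable (Spec_passes_l_diversity group_sensitive_records active_sensitive_fields l out) := by unfold Spec_passes_l_diversity; infer_instance

-- ===== CLAIM (what is proved, stated in full; the proofs are below) =====
def Claim_equal_passes_l_diversity : Prop := ∀ (group_sensitive_records : List (List (String × Option String))) (active_sensitive_fields : List String) (l : Int), Dom_passes_l_diversity group_sensitive_records active_sensitive_fields l → Spec_passes_l_diversity group_sensitive_records active_sensitive_fields l (passes_l_diversity group_sensitive_records active_sensitive_fields l)

-- ===== LEMMAS AND PROOFS =====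

-- run count as a structural recursion (proof-side view of B's fold)
def pvRunsCount : Option String → List String → Int
  | _, [] => 0
  | prev, v :: rest => (if prev = some v then 0 else 1) + pvRunsCount (some v) rest

theorem pv_fold_runs (ys : List String) :
    ∀ (c : Int) (p : Option String),
      (ys.foldl
        (fun (st : Int × Option String) v =>
          ((if st.2 = some v then st.1 else st.1 + 1), some v)) (c, p)).1
        = c + pvRunsCount p ys := by
  induction ys with
  | nil => intro c p; simp [pvRunsCount]
  | cons v rest ih =>
      intro c p
      simp only [List.foldl_cons, pvRunsCount]
      rw [ih]
      by_cases h : p = some v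
      · simp [h]
      · simp [h]
        ring

-- inserting y then removing it again: the card of insert, as Int arithmetic
theorem pv_card_insert (s : Finset String) (y : String) :
    (((insert y s).card : Int)) = 1 + ((s \ {y}).card : Int) := by
  rw [Finset.sdiff_singleton_eq_erase]
  by_cases hmem : y ∈ s
  · rw [Finset.insert_eq_self.mpr hmem, Finset.card_erase_of_mem hmem]
    have h1 : 1 ≤ s.card := Finset.card_pos.mpr ⟨y, hmem⟩
    omega
  · rw [Finset.erase_eq_of_notMem hmem, Finset.card_insert_of_notMem hmem]
    push_cast
    ring

-- with prev = some v and every element ≥ v, the run count is the card of the values ≠ v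
theorem pv_runs_some (ys : List String) :
    ∀ v : String, ys.Pairwise (· ≤ ·) → (∀ y ∈ ys, v ≤ y) →
      pvRunsCount (some v) ys = ((ys.toFinset \ {v}).card : Int) := by
  induction ys with
  | nil => intro v _ _; simp [pvRunsCount]
  | cons y t ih =>
      intro v hp hle
      have hyt : ∀ z ∈ t, y ≤ z := by
        intro z hz; exact List.rel_of_pairwise_cons hp hz
      have hpt : t.Pairwise (· ≤ ·) := hp.of_cons
      by_cases h : y = v
      · subst h
        have h0 : pvRunsCount (some y) (y :: t) = pvRunsCount (some y) t := by
          simp [pvRunsCount]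
        rw [h0, ih y hpt hyt]
        congr 2
        simp only [List.toFinset_cons]
        rw [Finset.insert_sdiff_of_mem _ (Finset.mem_singleton_self y)]
      · have hvy : v ≤ y := hle y (List.mem_cons_self)
        have hvnt : v ∉ t.toFinset := by
          simp only [List.mem_toFinset]
          intro hv
          exact h (le_antisymm (hyt v hv) hvy)
        have h0 : pvRunsCount (some v) (y :: t) = 1 + pvRunsCount (some y) t := by
          simp [pvRunsCount, Ne.symm h]
        rw [h0, ih y hpt hyt]
        have hset : (y :: t).toFinset \ {v} = insert y t.toFinset := by
          simp only [List.toFinset_cons]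
          rw [Finset.insert_sdiff_of_notMem _ (by simp [h] : y ∉ ({v} : Finset String)),
            Finset.sdiff_eq_self_of_disjoint (Finset.disjoint_singleton_right.mpr hvnt)]
        rw [hset, pv_card_insert]

-- the run count of a sorted list is the number of distinct elements
theorem pv_runs_none (ys : List String) (hp : ys.Pairwise (· ≤ ·)) :
    pvRunsCount none ys = (ys.toFinset.card : Int) := by
  cases ys with
  | nil => simp [pvRunsCount]
  | cons y t =>
      have hyt : ∀ z ∈ t, y ≤ z := fun z hz => List.rel_of_pairwise_cons hp hz
      have h0 : pvRunsCount none (y :: t) = 1 + pvRunsCount (some y) t := by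
        simp [pvRunsCount]
      rw [h0, pv_runs_some t y hp.of_cons hyt]
      simp only [List.toFinset_cons]
      rw [pv_card_insert]

-- B's distinct count of sorted xs equals the size of A's set of xs
theorem pv_distinct_eq_len (xs : List String) :
    pvDistinctSorted (PySem.List.sorted xs (fun x => x) false)
      = ((PySem.Set.ofList xs).length : Int) := by
  unfold pvDistinctSorted
  rw [pv_fold_runs, zero_add,
    pv_runs_none _ (by simpa using PySem.List.sorted_pairwise xs (fun x => x))]
  have h1 : (PySem.List.sorted xs (fun x => x) false).toFinset = xs.toFinset := by
    ext y
    simp only [List.mem_toFinset]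
    exact (PySem.List.sorted_perm xs (fun x => x) false).mem_iff
  have h2 : (PySem.Set.ofList xs).toFinset = xs.toFinset := by
    ext y
    simp [List.mem_toFinset, PySem.Set.mem_ofList]
  rw [h1, ← h2, List.toFinset_card_of_nodup (PySem.Set.nodup_ofList xs)]

-- A's early-return loop is an all() of B's per-field check
theorem pvLoopA_eq_all (gsr : List (List (String × Option String))) (l : Int)
    (fields : List String) :
    pvLoopA gsr l fields =
      fields.all (fun field =>
        decide ((max l 1) ≤
          pvDistinctSorted (PySem.List.sorted (pvVals gsr field) (fun x => x) false))) := by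
  induction fields with
  | nil => rfl
  | cons g rest ih =>
      have step : pvLoopA gsr l (g :: rest) =
          if (PySem.Set.ofList (pvVals gsr g)).isEmpty then false
          else if PySem.Set.len (PySem.Set.ofList (pvVals gsr g)) < l then false
          else pvLoopA gsr l rest := rfl
      rw [step, ih, List.all_cons, pv_distinct_eq_len]
      have hlen : PySem.Set.len (PySem.Set.ofList (pvVals gsr g))
          = ((PySem.Set.ofList (pvVals gsr g)).length : Int) := by
        simp [PySem.Set.len]
      rw [hlen]
      by_cases h0 : (PySem.Set.ofList (pvVals gsr g)).length = 0
      · have he : (PySem.Set.ofList (pvVals gsr g)).isEmpty = true := by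
          simp [List.length_eq_zero_iff.mp h0]
        rw [he]
        simp only [if_pos]
        have : ¬ (max l 1 ≤ ((PySem.Set.ofList (pvVals gsr g)).length : Int)) := by omega
        simp [this]
      · have he : (PySem.Set.ofList (pvVals gsr g)).isEmpty = false := by
          simpa [List.isEmpty_iff] using List.length_eq_zero_iff.not.mp h0
        rw [he]
        simp only [Bool.false_eq_true, if_neg, not_false_iff]
        by_cases h1 : ((PySem.Set.ofList (pvVals gsr g)).length : Int) < l
        · have : ¬ (max l 1 ≤ ((PySem.Set.ofList (pvVals gsr g)).length : Int)) := by omega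
          simp [h1, this]
        · have h2 : max l 1 ≤ ((PySem.Set.ofList (pvVals gsr g)).length : Int) := by omega
          simp [h1, h2]

-- ===== VERDICT (by name: the statement is the Claim_ definition above) =====
theorem passes_l_diversity_spec : Claim_equal_passes_l_diversity := by
  intro gsr fields l _
  unfold Spec_passes_l_diversity passes_l_diversity passes_l_diversity_alt
  by_cases he : fields.isEmpty
  · simp [he]
  · simp only [he, Bool.false_eq_true, if_neg, not_false_iff]
    exact pvLoopA_eq_all gsr l fields
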